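-- pv_equiv track=rewrite | github.com/PsychoLeo/informatique | algorithmique/fr-ioi/4.6_graphes/tourner_rond.py | DFS
-- ===== SOURCE A (Python) =====
-- def DFS (nbNodes, listAdj, i):
--     visited = [False]*nbNodes
--     visited[i] = True
--     toVisit = [i]
--     while toVisit :
--         node = toVisit.pop()
--         for neighbor in listAdj[node] :
--             if neighbor == i : # we have come back to a previous position
--                 return False
--             if not visited[neighbor] :
--                 toVisit.append(neighbor)
--                 visited[neighbor] = True
--     return True
-- ===== SOURCE B (Python) =====
-- def DFS(nbNodes, listAdj, i):
--     # Closure with interleaved check: repeatedly test whether any node collected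
--     # so far has an edge back to i, and otherwise expand the collected set by one
--     # whole-set round; stop with True when the set reaches a fixpoint.
--     # No visited array, no stack: the set itself is the state.
--     reach = [i]                      # distinct reachable nodes found so far
--     while True:
--         if any(i in listAdj[v] for v in reach):
--             return False
--         new = list(reach)
--         for v in reach:
--             for w in listAdj[v]:
--                 if w not in new:
--                     new.append(w)
--         if len(new) == len(reach):   # fixpoint: nothing new reachable
--             return True
--         reach = new
-- ===== Notes on version B (the rewrite author's own statement) =====
-- stated objective: alternative
-- what changed: Replaces the early-returning stack-DFS (pop a node, scan its neighbours, bail out on the first edge back to the start) by a round-based fixpoint algorithm: alternately check the whole set of nodes collected so far for an edge back to the start and expand it by one whole-set round until it stops growing.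
-- outside the precondition, e.g. on DFS(1, [[-1], [], [], [0, -1]], 0): A returns True, B returns False; on DFS(2, [[-2], [5], []], 0): A returns True, B raises IndexError
import Mathlib
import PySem

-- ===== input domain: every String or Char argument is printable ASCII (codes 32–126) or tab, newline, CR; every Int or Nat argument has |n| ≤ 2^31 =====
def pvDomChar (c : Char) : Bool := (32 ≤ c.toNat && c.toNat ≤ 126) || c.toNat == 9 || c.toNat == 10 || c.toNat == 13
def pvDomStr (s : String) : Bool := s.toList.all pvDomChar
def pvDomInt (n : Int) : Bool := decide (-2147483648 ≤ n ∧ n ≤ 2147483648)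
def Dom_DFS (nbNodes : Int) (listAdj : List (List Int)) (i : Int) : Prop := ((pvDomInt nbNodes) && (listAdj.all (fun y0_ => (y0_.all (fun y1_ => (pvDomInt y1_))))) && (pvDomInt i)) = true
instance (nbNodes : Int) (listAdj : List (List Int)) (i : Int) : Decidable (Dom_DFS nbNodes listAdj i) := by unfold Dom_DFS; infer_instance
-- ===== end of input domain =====

-- B replaces the early-returning stack DFS by a fixpoint closure of the reachable set
-- with a per-round check for an edge back to the start (objective: alternative, not faster).

-- ===== PORT A =====
-- listAdj[v] (Python indexing: negative v counts from the end; exact for -len ≤ v < len,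
-- the range Pre_DFS admits)
def adjAt (listAdj : List (List Int)) (v : Int) : List Int := PySem.List.pyGetD listAdj v []

-- Python's normalisation of a list index: exact for -m ≤ x < m
def slIdx (m : Nat) (x : Int) : Nat := (if x < 0 then x + m else x).toNat

-- visited[j] (in-bounds read)
def visA (V : List Bool) (j : Nat) : Bool := V.getD j false

-- the `for neighbor in listAdj[node]` body of A: `none` = `return False`,
-- `some (visited, stack)` = the for-loop finished with this state
-- (the stack's head is the Python list's LAST element, so `pop()` = take the head)
def innerA (i : Int) : List Int → List Bool → List Int → Option (List Bool × List Int)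
  | [], V, S => some (V, S)
  | x :: xs, V, S =>
    if x = i then none
    else if -(V.length : Int) ≤ x ∧ x < (V.length : Int) then
      if visA V (slIdx V.length x) then innerA i xs V S
      else innerA i xs (V.set (slIdx V.length x) true) (x :: S)
    else innerA i xs V S  -- visited[neighbor] raises IndexError in Python; unreachable under Pre_DFS

-- the `while toVisit:` loop of A; the fuel strictly dominates the loop's measure
-- (2·#unvisited + stack length decreases each iteration), so 0 is never reached
def loopA (i : Int) (listAdj : List (List Int)) : Nat → List Bool → List Int → Bool
  | 0, _, _ => true
  | _ + 1, _, [] => true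
  | fuel + 1, V, node :: rest =>
    match innerA i (adjAt listAdj node) V rest with
    | none => false
    | some p => loopA i listAdj fuel p.1 p.2

def DFS (nbNodes : Int) (listAdj : List (List Int)) (i : Int) : Bool :=
  -- visited = [False]*nbNodes; visited[i] = True  (wraps for -nbNodes ≤ i < 0;
  -- out-of-range i raises in Python and is excluded by Pre_DFS)
  let V := (List.replicate nbNodes.toNat false).set (slIdx nbNodes.toNat i) true
  loopA i listAdj (2 * V.count false + 2) V [i]

-- ===== PORT B =====
-- `if w not in new: new.append(w)`
def addNew (acc : List Int) (w : Int) : List Int := if w ∈ acc then acc else acc ++ [w]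

-- one expansion round: new = list(reach); for v in reach: for w in listAdj[v]: addNew
def expandB (listAdj : List (List Int)) (reach : List Int) : List Int :=
  reach.foldl (fun acc v => (adjAt listAdj v).foldl addNew acc) reach

-- the `while True:` loop of B: check the set collected so far for an edge back to i,
-- then expand it by one round; the fuel strictly dominates the rounds the Python loop
-- can run (reach holds distinct members of i :: listAdj.flatten and grows every
-- non-final round), so 0 is never reached
def loopB (listAdj : List (List Int)) (i : Int) : Nat → List Int → Bool
  | 0, _ => true
  | k + 1, reach =>
    if reach.any (fun v => (adjAt listAdj v).contains i) then false
    else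
      let nw := expandB listAdj reach
      if nw.length = reach.length then true else loopB listAdj i k nw

def DFS_alt (nbNodes : Int) (listAdj : List (List Int)) (i : Int) : Bool :=
  loopB listAdj i (listAdj.flatten.length + 2) [i]

-- ===== PRECONDITION & SPEC =====
-- pvClosure: the set of node values the traversal starting at i can ever mention
-- (i together with every value reachable from it through the adjacency rows, Python
-- indexing).  A pure function of the input graph, used only to STATE Pre_DFS.
def pvStep (listAdj : List (List Int)) (S : List Int) : List Int :=
  (S ++ S.flatMap (fun v => adjAt listAdj v)).dedup

def pvClosure (listAdj : List (List Int)) (i : Int) : List Int :=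
  (pvStep listAdj)^[listAdj.flatten.length + 1] [i]

-- Pre_DFS = the start is a valid visited-index and either (a) the graph is well formed
-- where the traversal can see it — every reachable node value a valid row index with
-- valid neighbour values, and no two distinct reachable values denoting the same visited
-- slot unless no reachable node has an edge back to i at all — or (b) i's own row lists
-- i after only valid neighbours, so both programs answer False on their first step.  On
-- inputs outside Pre_ the exploration meets an out-of-range or slot-aliased node, and
-- whether A raises IndexError there or returns just before touching it is an artefact of
-- its incidental LIFO traversal order; B does the natural thing there (usually agreeing).
def Pre_DFS (nbNodes : Int) (listAdj : List (List Int)) (i : Int) : Prop :=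
  0 < nbNodes ∧ -nbNodes ≤ i ∧ i < nbNodes ∧
  (((∀ v ∈ pvClosure listAdj i,
      (-(listAdj.length : Int) ≤ v ∧ v < (listAdj.length : Int)) ∧
      ∀ w ∈ adjAt listAdj v, -nbNodes ≤ w ∧ w < nbNodes) ∧
    (((pvClosure listAdj i).map (fun v => if v < 0 then v + nbNodes else v)).Nodup ∨
      ∀ v ∈ pvClosure listAdj i, i ∉ adjAt listAdj v)) ∨
   (i ∈ adjAt listAdj i ∧
    ∀ x ∈ (adjAt listAdj i).takeWhile (fun x => x != i), -nbNodes ≤ x ∧ x < nbNodes))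
instance (nbNodes : Int) (listAdj : List (List Int)) (i : Int) : Decidable (Pre_DFS nbNodes listAdj i) := by
  unfold Pre_DFS; infer_instance

def pvWitness_DFS : Int × List (List Int) × Int := (2, [[1], [0]], 0)

def Spec_DFS (nbNodes : Int) (listAdj : List (List Int)) (i : Int) (out : Bool) : Prop := out = DFS_alt nbNodes listAdj i
instance (nbNodes : Int) (listAdj : List (List Int)) (i : Int) (out : Bool) : Decidable (Spec_DFS nbNodes listAdj i out) := by unfold Spec_DFS; infer_instance

-- ===== CLAIM (what is proved, stated in full; the proofs are below) =====
def Claim_equal_DFS : Prop := ∀ (nbNodes : Int) (listAdj : List (List Int)) (i : Int), Dom_DFS nbNodes listAdj i → Pre_DFS nbNodes listAdj i → Spec_DFS nbNodes listAdj i (DFS nbNodes listAdj i)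

-- ===== LEMMAS AND PROOFS =====

-- the common specification: no node reachable from i has an edge back to i
def Step (listAdj : List (List Int)) (a b : Int) : Prop := b ∈ adjAt listAdj a
def Reach (listAdj : List (List Int)) (i v : Int) : Prop := Relation.ReflTransGen (Step listAdj) i v
def NoBack (listAdj : List (List Int)) (i : Int) : Prop :=
  ∀ v, Reach listAdj i v → i ∉ adjAt listAdj v

-- ---- facts about the closure pvClosure ----

theorem mem_adjAt_flatten {listAdj : List (List Int)} {v x : Int}
    (hx : x ∈ adjAt listAdj v) : x ∈ listAdj.flatten := by
  rcases hg : PySem.List.pyGet? listAdj v with _ | row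
  · have hnil : adjAt listAdj v = [] := by simp [adjAt, PySem.List.pyGetD, hg]
    rw [hnil] at hx; simp at hx
  · have hrow : adjAt listAdj v = row := by simp [adjAt, PySem.List.pyGetD, hg]
    rw [hrow] at hx
    exact List.mem_flatten.2 ⟨row, PySem.List.mem_of_pyGet?_eq_some _ hg, hx⟩

theorem mem_pvStep {listAdj : List (List Int)} {S : List Int} {x : Int} :
    x ∈ pvStep listAdj S ↔ x ∈ S ∨ ∃ v ∈ S, x ∈ adjAt listAdj v := by
  unfold pvStep
  simp [List.mem_dedup, List.mem_append, List.mem_flatMap]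

theorem pvStep_super {listAdj : List (List Int)} {S : List Int} :
    ∀ x ∈ S, x ∈ pvStep listAdj S :=
  fun _ hx => mem_pvStep.2 (Or.inl hx)

theorem pvClosure_mono {listAdj : List (List Int)} {i : Int} :
    ∀ k, ∀ x ∈ (pvStep listAdj)^[k] [i], x ∈ (pvStep listAdj)^[k + 1] [i] := by
  intro k x hx
  rw [Function.iterate_succ_apply']
  exact pvStep_super x hx

theorem pvClosure_mono_le {listAdj : List (List Int)} {i : Int} {k m : Nat} (hkm : k ≤ m) :
    ∀ x ∈ (pvStep listAdj)^[k] [i], x ∈ (pvStep listAdj)^[m] [i] := by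
  induction m with
  | zero => intro x hx; have : k = 0 := by omega
            rw [this] at hx; exact hx
  | succ m ih =>
    intro x hx
    rcases Nat.lt_or_ge k (m + 1) with hlt | hge
    · exact pvClosure_mono m x (ih (by omega) x hx)
    · have : k = m + 1 := by omega
      rw [this] at hx; exact hx

theorem pvClosure_self {listAdj : List (List Int)} {i : Int} : i ∈ pvClosure listAdj i := by
  unfold pvClosure
  exact pvClosure_mono_le (Nat.zero_le _) i (by simp)

theorem pvClosure_subset_univ {listAdj : List (List Int)} {i : Int} :
    ∀ k, ∀ x ∈ (pvStep listAdj)^[k] [i], x ∈ i :: listAdj.flatten := by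
  intro k
  induction k with
  | zero => intro x hx; simp at hx; simp [hx]
  | succ k ih =>
    intro x hx
    rw [Function.iterate_succ_apply'] at hx
    rcases mem_pvStep.1 hx with hx' | ⟨v, _, hxv⟩
    · exact ih x hx'
    · exact List.mem_cons_of_mem _ (mem_adjAt_flatten hxv)

theorem pvClosure_nodup {listAdj : List (List Int)} {i : Int} :
    ∀ k, ((pvStep listAdj)^[k] [i]).Nodup := by
  intro k
  cases k with
  | zero => simp
  | succ k =>
    rw [Function.iterate_succ_apply']
    exact List.nodup_dedup _

theorem pvClosure_len_le {listAdj : List (List Int)} {i : Int} :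
    ∀ k, ((pvStep listAdj)^[k] [i]).length ≤ listAdj.flatten.length + 1 := by
  intro k
  have h := ((pvClosure_nodup (listAdj := listAdj) (i := i) k).subperm
    (fun x hx => pvClosure_subset_univ k x hx)).length_le
  simpa using h

theorem pvClosure_closed {listAdj : List (List Int)} {i : Int} :
    ∀ x ∈ pvStep listAdj (pvClosure listAdj i), x ∈ pvClosure listAdj i := by
  set N := listAdj.flatten.length + 1 with hN
  -- either some round before N is already stable, or the length grows past the bound
  have key : ∀ k : Nat, (∀ x ∈ (pvStep listAdj)^[k + 1] [i], x ∈ (pvStep listAdj)^[k] [i]) ∨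
      ((pvStep listAdj)^[k] [i]).length + 1 ≤ ((pvStep listAdj)^[k + 1] [i]).length := by
    intro k
    by_cases hc : ∀ x ∈ (pvStep listAdj)^[k + 1] [i], x ∈ (pvStep listAdj)^[k] [i]
    · exact Or.inl hc
    · push Not at hc
      obtain ⟨x, hx1, hx2⟩ := hc
      have hsp : List.Subperm ((pvStep listAdj)^[k] [i]) ((pvStep listAdj)^[k + 1] [i]) :=
        (pvClosure_nodup k).subperm (fun y hy => pvClosure_mono k y hy)
      refine Or.inr ?_
      by_contra hle
      push Not at hle
      have hperm := hsp.perm_of_length_le (by omega)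
      exact hx2 (hperm.mem_iff.2 hx1)
  have exists_stable : ∃ k, k < N ∧
      (∀ x ∈ (pvStep listAdj)^[k + 1] [i], x ∈ (pvStep listAdj)^[k] [i]) := by
    by_contra hno
    push Not at hno
    have grow : ∀ k, k ≤ N → k + 1 ≤ ((pvStep listAdj)^[k] [i]).length := by
      intro k
      induction k with
      | zero => intro _; simp
      | succ k ih =>
        intro hk
        have h1 := ih (by omega)
        rcases key k with hs | hg
        · obtain ⟨x, hx1, hx2⟩ := hno k (by omega)
          exact absurd (hs x hx1) hx2
        · omega
    have h1 := grow N (le_refl N)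
    have h2 := pvClosure_len_le (listAdj := listAdj) (i := i) N
    omega
  obtain ⟨k, hkN, hst⟩ := exists_stable
  have hstep : ∀ x, x ∈ pvStep listAdj ((pvStep listAdj)^[k] [i]) →
      x ∈ (pvStep listAdj)^[k] [i] := by
    intro x hx
    exact hst x (by rw [Function.iterate_succ_apply']; exact hx)
  have stable_mem : ∀ m, k ≤ m →
      ∀ x, x ∈ (pvStep listAdj)^[m] [i] ↔ x ∈ (pvStep listAdj)^[k] [i] := by
    intro m
    induction m with
    | zero => intro hm x; have : k = 0 := by omega
              rw [this]
    | succ m ih =>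
      intro hm x
      rcases Nat.lt_or_ge k (m + 1) with hlt | hge
      · have ihm := ih (by omega)
        constructor
        · intro hx
          rw [Function.iterate_succ_apply'] at hx
          rcases mem_pvStep.1 hx with hx' | ⟨v, hv, hxv⟩
          · exact (ihm x).1 hx'
          · exact hstep x (mem_pvStep.2 (Or.inr ⟨v, (ihm v).1 hv, hxv⟩))
        · intro hx
          exact pvClosure_mono m x ((ihm x).2 hx)
      · have : k = m + 1 := by omega
        rw [this]
  intro x hx
  rcases mem_pvStep.1 hx with hx' | ⟨v, hv, hxv⟩
  · exact hx'
  · have hvk : v ∈ (pvStep listAdj)^[k] [i] := (stable_mem N (by omega) v).1 hv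
    have hxk : x ∈ (pvStep listAdj)^[k] [i] :=
      hstep x (mem_pvStep.2 (Or.inr ⟨v, hvk, hxv⟩))
    exact (stable_mem N (by omega) x).2 hxk

theorem pvClosure_step {listAdj : List (List Int)} {i : Int} :
    ∀ v ∈ pvClosure listAdj i, ∀ w ∈ adjAt listAdj v, w ∈ pvClosure listAdj i :=
  fun v hv w hw => pvClosure_closed w (mem_pvStep.2 (Or.inr ⟨v, hv, hw⟩))

theorem pvClosure_origin {listAdj : List (List Int)} {i : Int} :
    ∀ v ∈ pvClosure listAdj i, v = i ∨ ∃ u ∈ pvClosure listAdj i, v ∈ adjAt listAdj u := by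
  have aux : ∀ k, ∀ v ∈ (pvStep listAdj)^[k] [i],
      v = i ∨ ∃ u ∈ (pvStep listAdj)^[k] [i], v ∈ adjAt listAdj u := by
    intro k
    induction k with
    | zero => intro v hv; simp at hv; exact Or.inl hv
    | succ k ih =>
      intro v hv
      rw [Function.iterate_succ_apply'] at hv
      rcases mem_pvStep.1 hv with hv' | ⟨u, hu, hvu⟩
      · rcases ih v hv' with h | ⟨u, hu, hvu⟩
        · exact Or.inl h
        · exact Or.inr ⟨u, pvClosure_mono k u hu, hvu⟩
      · exact Or.inr ⟨u, pvClosure_mono k u hu, hvu⟩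
  exact aux _

theorem reach_mem_closure {listAdj : List (List Int)} {i v : Int}
    (h : Reach listAdj i v) : v ∈ pvClosure listAdj i := by
  induction h with
  | refl => exact pvClosure_self
  | tail _ hbc ih => exact pvClosure_step _ ih _ hbc

-- ---- consequences of case (a) of Pre_DFS (abbreviated PreA for the lemmas below) ----

def PreA (nbNodes : Int) (listAdj : List (List Int)) (i : Int) : Prop :=
  0 < nbNodes ∧ -nbNodes ≤ i ∧ i < nbNodes ∧
  (∀ v ∈ pvClosure listAdj i,
      (-(listAdj.length : Int) ≤ v ∧ v < (listAdj.length : Int)) ∧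
      ∀ w ∈ adjAt listAdj v, -nbNodes ≤ w ∧ w < nbNodes) ∧
  ((pvClosure listAdj i).map (fun v => if v < 0 then v + nbNodes else v)).Nodup

theorem pre_bounds {nbNodes : Int} {listAdj : List (List Int)} {i : Int}
    (hp : PreA nbNodes listAdj i) :
    ∀ v ∈ pvClosure listAdj i, -nbNodes ≤ v ∧ v < nbNodes := by
  intro v hv
  rcases pvClosure_origin v hv with rfl | ⟨u, hu, hvu⟩
  · exact ⟨hp.2.1, hp.2.2.1⟩
  · exact (hp.2.2.2.1 u hu).2 v hvu

theorem slIdx_lt {nbNodes x : Int} (hnb : 0 < nbNodes) (_h1 : -nbNodes ≤ x) (h2 : x < nbNodes) :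
    slIdx nbNodes.toNat x < nbNodes.toNat := by
  unfold slIdx; split_ifs <;> omega

theorem pre_inj {nbNodes : Int} {listAdj : List (List Int)} {i : Int}
    (hp : PreA nbNodes listAdj i) {v w : Int}
    (hv : v ∈ pvClosure listAdj i) (hw : w ∈ pvClosure listAdj i)
    (h : slIdx nbNodes.toNat v = slIdx nbNodes.toNat w) : v = w := by
  have hbv := pre_bounds hp v hv
  have hbw := pre_bounds hp w hw
  have hnb := hp.1
  refine List.inj_on_of_nodup_map hp.2.2.2.2 hv hw ?_
  unfold slIdx at h
  split_ifs at h <;> omega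

-- ---- facts about visA / count ----

theorem visA_set (V : List Bool) (k j : Nat) :
    visA (V.set k true) j = if k = j ∧ k < V.length then true else visA V j := by
  simp only [visA, List.getD_eq_getElem?_getD, List.getElem?_set]
  by_cases hkj : k = j
  · subst hkj; by_cases hk : k < V.length <;> simp [hk]
  · simp [hkj]

theorem visA_replicate (n j : Nat) : visA (List.replicate n false) j = false := by
  simp only [visA, List.getD_eq_getElem?_getD, List.getElem?_replicate]
  split <;> simp

theorem count_false_set (l : List Bool) (j : Nat) (hj : j < l.length)
    (hv : visA l j = false) : (l.set j true).count false + 1 = l.count false := by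
  induction l generalizing j with
  | nil => simp at hj
  | cons a t ih =>
    cases j with
    | zero =>
      have ha : a = false := by simpa [visA] using hv
      subst ha; simp
    | succ j =>
      have hj' : j < t.length := by simpa using hj
      have hv' : visA t j = false := by simpa [visA, List.getD_eq_getElem?_getD] using hv
      have := ih j hj' hv'
      simp only [List.set, List.count_cons]
      omega

-- ---- facts about innerA (all by induction over the neighbour list) ----

theorem innerA_cons (i x : Int) (xs : List Int) (V : List Bool) (S : List Int) :
    innerA i (x :: xs) V S =
      if x = i then none
      else if -(V.length : Int) ≤ x ∧ x < (V.length : Int) then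
        if visA V (slIdx V.length x) then innerA i xs V S
        else innerA i xs (V.set (slIdx V.length x) true) (x :: S)
      else innerA i xs V S := rfl

theorem innerA_measure (i : Int) : ∀ (xs : List Int) (V : List Bool) (S : List Int)
    (V' : List Bool) (S' : List Int), innerA i xs V S = some (V', S') →
    2 * V'.count false + S'.length ≤ 2 * V.count false + S.length ∧ V'.length = V.length := by
  intro xs
  induction xs with
  | nil =>
    intro V S V' S' h
    simp only [innerA, Option.some.injEq, Prod.mk.injEq] at h
    obtain ⟨h1, h2⟩ := h; subst h1; subst h2; omega
  | cons x xs ih =>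
    intro V S V' S' h
    rw [innerA_cons] at h
    by_cases h1 : x = i
    · rw [if_pos h1] at h; exact absurd h (by simp)
    rw [if_neg h1] at h
    by_cases h2 : -(V.length : Int) ≤ x ∧ x < (V.length : Int)
    · rw [if_pos h2] at h
      by_cases h3 : visA V (slIdx V.length x) = true
      · rw [if_pos h3] at h
        exact ih V S V' S' h
      · rw [if_neg h3] at h
        have hvf : visA V (slIdx V.length x) = false := by simpa using h3
        have hsl : slIdx V.length x < V.length := by
          unfold slIdx; split_ifs <;> omega
        have hcf := count_false_set V (slIdx V.length x) hsl hvf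
        have hx := ih (V.set (slIdx V.length x) true) (x :: S) V' S' h
        have hlen : (V.set (slIdx V.length x) true).length = V.length := by simp
        refine ⟨?_, by omega⟩
        have := hx.1
        simp only [List.length_cons] at this
        omega
    · rw [if_neg h2] at h
      exact ih V S V' S' h

theorem innerA_mono (i : Int) : ∀ (xs : List Int) (V : List Bool) (S : List Int)
    (V' : List Bool) (S' : List Int), innerA i xs V S = some (V', S') →
    ∀ j, visA V j = true → visA V' j = true := by
  intro xs
  induction xs with
  | nil =>
    intro V S V' S' h j hj
    simp only [innerA, Option.some.injEq, Prod.mk.injEq] at h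
    rw [← h.1]; exact hj
  | cons x xs ih =>
    intro V S V' S' h j hj
    rw [innerA_cons] at h
    by_cases h1 : x = i
    · rw [if_pos h1] at h; exact absurd h (by simp)
    rw [if_neg h1] at h
    by_cases h2 : -(V.length : Int) ≤ x ∧ x < (V.length : Int)
    · rw [if_pos h2] at h
      by_cases h3 : visA V (slIdx V.length x) = true
      · rw [if_pos h3] at h
        exact ih _ _ _ _ h j hj
      · rw [if_neg h3] at h
        refine ih _ _ _ _ h j ?_
        rw [visA_set]; split_ifs with h4
        · rfl
        · exact hj
    · rw [if_neg h2] at h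
      exact ih _ _ _ _ h j hj

theorem innerA_ne (i : Int) : ∀ (xs : List Int) (V : List Bool) (S : List Int)
    (V' : List Bool) (S' : List Int), innerA i xs V S = some (V', S') →
    ∀ y ∈ xs, y ≠ i := by
  intro xs
  induction xs with
  | nil => intro V S V' S' _ y hy; simp at hy
  | cons x xs ih =>
    intro V S V' S' h y hy
    rw [innerA_cons] at h
    by_cases h1 : x = i
    · rw [if_pos h1] at h; exact absurd h (by simp)
    rw [if_neg h1] at h
    by_cases h2 : -(V.length : Int) ≤ x ∧ x < (V.length : Int)
    · rw [if_pos h2] at h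
      by_cases h3 : visA V (slIdx V.length x) = true
      · rw [if_pos h3] at h
        rcases List.mem_cons.1 hy with rfl | hy'
        · exact h1
        · exact ih _ _ _ _ h y hy'
      · rw [if_neg h3] at h
        rcases List.mem_cons.1 hy with rfl | hy'
        · exact h1
        · exact ih _ _ _ _ h y hy'
    · rw [if_neg h2] at h
      rcases List.mem_cons.1 hy with rfl | hy'
      · exact h1
      · exact ih _ _ _ _ h y hy'

theorem innerA_visits (i : Int) : ∀ (xs : List Int) (V : List Bool) (S : List Int)
    (V' : List Bool) (S' : List Int), innerA i xs V S = some (V', S') →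
    ∀ y ∈ xs, -(V.length : Int) ≤ y → y < (V.length : Int) →
      visA V' (slIdx V.length y) = true := by
  intro xs
  induction xs with
  | nil => intro V S V' S' _ y hy; simp at hy
  | cons x xs ih =>
    intro V S V' S' h y hy hy0 hyl
    rw [innerA_cons] at h
    by_cases h1 : x = i
    · rw [if_pos h1] at h; exact absurd h (by simp)
    rw [if_neg h1] at h
    by_cases h2 : -(V.length : Int) ≤ x ∧ x < (V.length : Int)
    · rw [if_pos h2] at h
      by_cases h3 : visA V (slIdx V.length x) = true
      · rw [if_pos h3] at h
        rcases List.mem_cons.1 hy with rfl | hy'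
        · exact innerA_mono i _ _ _ _ _ h _ h3
        · exact ih _ _ _ _ h y hy' hy0 hyl
      · rw [if_neg h3] at h
        have hsl : slIdx V.length x < V.length := by
          unfold slIdx; split_ifs <;> omega
        rcases List.mem_cons.1 hy with rfl | hy'
        · refine innerA_mono i _ _ _ _ _ h _ ?_
          rw [visA_set]; simp [hsl]
        · have hlen : (V.set (slIdx V.length x) true).length = V.length := by simp
          have := ih _ _ _ _ h y hy' (by rw [hlen]; exact hy0) (by rw [hlen]; exact hyl)
          rwa [hlen] at this
    · rw [if_neg h2] at h
      rcases List.mem_cons.1 hy with rfl | hy'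
      · exact absurd ⟨hy0, hyl⟩ h2
      · exact ih _ _ _ _ h y hy' hy0 hyl

theorem innerA_new (i : Int) : ∀ (xs : List Int) (V : List Bool) (S : List Int)
    (V' : List Bool) (S' : List Int), innerA i xs V S = some (V', S') →
    ∀ j, visA V' j = true → visA V j = true ∨
      ∃ y ∈ xs, (-(V.length : Int) ≤ y ∧ y < (V.length : Int)) ∧ slIdx V.length y = j := by
  intro xs
  induction xs with
  | nil =>
    intro V S V' S' h j hj
    simp only [innerA, Option.some.injEq, Prod.mk.injEq] at h
    rw [← h.1] at hj; exact Or.inl hj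
  | cons x xs ih =>
    intro V S V' S' h j hj
    rw [innerA_cons] at h
    by_cases h1 : x = i
    · rw [if_pos h1] at h; exact absurd h (by simp)
    rw [if_neg h1] at h
    by_cases h2 : -(V.length : Int) ≤ x ∧ x < (V.length : Int)
    · rw [if_pos h2] at h
      by_cases h3 : visA V (slIdx V.length x) = true
      · rw [if_pos h3] at h
        rcases ih _ _ _ _ h j hj with ho | ⟨y, hy, hb, hs⟩
        · exact Or.inl ho
        · exact Or.inr ⟨y, List.mem_cons_of_mem _ hy, hb, hs⟩
      · rw [if_neg h3] at h
        have hlen : (V.set (slIdx V.length x) true).length = V.length := by simp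
        rcases ih _ _ _ _ h j hj with ho | ⟨y, hy, hb, hs⟩
        · rw [visA_set] at ho
          by_cases hc : slIdx V.length x = j ∧ slIdx V.length x < V.length
          · exact Or.inr ⟨x, List.mem_cons_self, h2, hc.1⟩
          · rw [if_neg hc] at ho; exact Or.inl ho
        · rw [hlen] at hb hs
          exact Or.inr ⟨y, List.mem_cons_of_mem _ hy, hb, hs⟩
    · rw [if_neg h2] at h
      rcases ih _ _ _ _ h j hj with ho | ⟨y, hy, hb, hs⟩
      · exact Or.inl ho
      · exact Or.inr ⟨y, List.mem_cons_of_mem _ hy, hb, hs⟩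

theorem innerA_stack (i : Int) : ∀ (xs : List Int) (V : List Bool) (S : List Int)
    (V' : List Bool) (S' : List Int), innerA i xs V S = some (V', S') →
    ∀ y ∈ S', y ∈ S ∨ (y ∈ xs ∧ visA V (slIdx V.length y) = false ∧
      (-(V.length : Int) ≤ y ∧ y < (V.length : Int))) := by
  intro xs
  induction xs with
  | nil =>
    intro V S V' S' h y hy
    simp only [innerA, Option.some.injEq, Prod.mk.injEq] at h
    rw [← h.2] at hy; exact Or.inl hy
  | cons x xs ih =>
    intro V S V' S' h y hy
    rw [innerA_cons] at h
    by_cases h1 : x = i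
    · rw [if_pos h1] at h; exact absurd h (by simp)
    rw [if_neg h1] at h
    by_cases h2 : -(V.length : Int) ≤ x ∧ x < (V.length : Int)
    · rw [if_pos h2] at h
      by_cases h3 : visA V (slIdx V.length x) = true
      · rw [if_pos h3] at h
        rcases ih _ _ _ _ h y hy with ho | ⟨ha, hb, hc⟩
        · exact Or.inl ho
        · exact Or.inr ⟨List.mem_cons_of_mem _ ha, hb, hc⟩
      · rw [if_neg h3] at h
        have hlen : (V.set (slIdx V.length x) true).length = V.length := by simp
        rcases ih _ _ _ _ h y hy with ho | ⟨ha, hb, hc⟩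
        · rcases List.mem_cons.1 ho with rfl | hyS
          · exact Or.inr ⟨List.mem_cons_self, by simpa using h3, h2⟩
          · exact Or.inl hyS
        · rw [hlen] at hb hc
          refine Or.inr ⟨List.mem_cons_of_mem _ ha, ?_, hc⟩
          rw [visA_set] at hb
          by_cases h4 : slIdx V.length x = slIdx V.length y ∧ slIdx V.length x < V.length
          · rw [if_pos h4] at hb; exact absurd hb (by simp)
          · rw [if_neg h4] at hb; exact hb
    · rw [if_neg h2] at h
      rcases ih _ _ _ _ h y hy with ho | ⟨ha, hb, hc⟩
      · exact Or.inl ho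
      · exact Or.inr ⟨List.mem_cons_of_mem _ ha, hb, hc⟩

theorem innerA_super (i : Int) : ∀ (xs : List Int) (V : List Bool) (S : List Int)
    (V' : List Bool) (S' : List Int), innerA i xs V S = some (V', S') →
    ∀ y ∈ S, y ∈ S' := by
  intro xs
  induction xs with
  | nil =>
    intro V S V' S' h y hy
    simp only [innerA, Option.some.injEq, Prod.mk.injEq] at h
    rw [← h.2]; exact hy
  | cons x xs ih =>
    intro V S V' S' h y hy
    rw [innerA_cons] at h
    by_cases h1 : x = i
    · rw [if_pos h1] at h; exact absurd h (by simp)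
    rw [if_neg h1] at h
    by_cases h2 : -(V.length : Int) ≤ x ∧ x < (V.length : Int)
    · rw [if_pos h2] at h
      by_cases h3 : visA V (slIdx V.length x) = true
      · rw [if_pos h3] at h
        exact ih _ _ _ _ h y hy
      · rw [if_neg h3] at h
        exact ih _ _ _ _ h y (List.mem_cons_of_mem _ hy)
    · rw [if_neg h2] at h
      exact ih _ _ _ _ h y hy

theorem innerA_newly (i : Int) : ∀ (xs : List Int) (V : List Bool) (S : List Int)
    (V' : List Bool) (S' : List Int), innerA i xs V S = some (V', S') →
    ∀ j, visA V j = false → visA V' j = true → ∃ y ∈ S', slIdx V.length y = j := by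
  intro xs
  induction xs with
  | nil =>
    intro V S V' S' h j hj hj'
    simp only [innerA, Option.some.injEq, Prod.mk.injEq] at h
    rw [← h.1] at hj'; rw [hj] at hj'; simp at hj'
  | cons x xs ih =>
    intro V S V' S' h j hj hj'
    rw [innerA_cons] at h
    by_cases h1 : x = i
    · rw [if_pos h1] at h; exact absurd h (by simp)
    rw [if_neg h1] at h
    by_cases h2 : -(V.length : Int) ≤ x ∧ x < (V.length : Int)
    · rw [if_pos h2] at h
      by_cases h3 : visA V (slIdx V.length x) = true
      · rw [if_pos h3] at h
        exact ih _ _ _ _ h j hj hj'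
      · rw [if_neg h3] at h
        have hlen : (V.set (slIdx V.length x) true).length = V.length := by simp
        cases hb : visA (V.set (slIdx V.length x) true) j with
        | false =>
          obtain ⟨y, hy, hs⟩ := ih _ _ _ _ h j hb hj'
          exact ⟨y, hy, by rwa [hlen] at hs⟩
        | true =>
          rw [visA_set] at hb
          by_cases hc : slIdx V.length x = j ∧ slIdx V.length x < V.length
          · exact ⟨x, innerA_super i _ _ _ _ _ h x List.mem_cons_self, hc.1⟩
          · rw [if_neg hc] at hb; rw [hj] at hb; exact absurd hb (by simp)
    · rw [if_neg h2] at h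
      exact ih _ _ _ _ h j hj hj'

theorem innerA_none_iff (i : Int) : ∀ (xs : List Int) (V : List Bool) (S : List Int),
    innerA i xs V S = none ↔ i ∈ xs := by
  intro xs
  induction xs with
  | nil => intro V S; simp [innerA]
  | cons x xs ih =>
    intro V S
    rw [innerA_cons]
    by_cases h1 : x = i
    · rw [if_pos h1]; subst h1; simp
    rw [if_neg h1]
    have hne : ¬(i = x) := fun he => h1 he.symm
    by_cases h2 : -(V.length : Int) ≤ x ∧ x < (V.length : Int)
    · rw [if_pos h2]
      by_cases h3 : visA V (slIdx V.length x) = true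
      · rw [if_pos h3, ih]; simp [List.mem_cons, hne]
      · rw [if_neg h3, ih]; simp [List.mem_cons, hne]
    · rw [if_neg h2, ih]; simp [List.mem_cons, hne]

-- ---- the A-side loop invariant ----

theorem loopA_iff {nbNodes : Int} {listAdj : List (List Int)} {i : Int}
    (hp : PreA nbNodes listAdj i) :
    ∀ (fuel : Nat) (V : List Bool) (S : List Int),
    2 * V.count false + S.length < fuel →
    V.length = nbNodes.toNat →
    (∀ x ∈ S, x ∈ pvClosure listAdj i ∧ visA V (slIdx nbNodes.toNat x) = true) →
    (∀ v ∈ pvClosure listAdj i, visA V (slIdx nbNodes.toNat v) = true → Reach listAdj i v) →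
    (∀ j, visA V j = true → ∃ v ∈ pvClosure listAdj i, slIdx nbNodes.toNat v = j) →
    (∀ v ∈ pvClosure listAdj i, visA V (slIdx nbNodes.toNat v) = true → v ∉ S →
       ∀ w ∈ adjAt listAdj v, w ≠ i ∧ visA V (slIdx nbNodes.toNat w) = true) →
    visA V (slIdx nbNodes.toNat i) = true →
    (loopA i listAdj fuel V S = true ↔ NoBack listAdj i) := by
  intro fuel
  induction fuel with
  | zero => intro V S hfuel; omega
  | succ fuel ih =>
    intro V S hfuel hlen hS hVr hcov hcl hi
    cases S with
    | nil =>
      simp only [loopA]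
      refine iff_of_true trivial ?_
      have key : ∀ v, Reach listAdj i v → visA V (slIdx nbNodes.toNat v) = true := by
        intro v hr
        induction hr with
        | refl => exact hi
        | tail hab hbc ihr =>
          have hb := reach_mem_closure hab
          exact (hcl _ hb ihr (by simp) _ hbc).2
      intro v hr hin
      have hv := reach_mem_closure hr
      exact (hcl v hv (key v hr) (by simp) i hin).1 rfl
    | cons node rest =>
      obtain ⟨hnode_in, hnode_vis⟩ := hS node List.mem_cons_self
      cases hinner : innerA i (adjAt listAdj node) V rest with
      | none =>
        have hback : i ∈ adjAt listAdj node := (innerA_none_iff i _ V rest).1 hinner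
        have hreach : Reach listAdj i node := hVr node hnode_in hnode_vis
        simp only [loopA, hinner]
        exact iff_of_false (by simp) (fun hnb => hnb node hreach hback)
      | some p =>
        simp only [loopA, hinner]
        have hnb := hp.1
        have hrowC : ∀ w ∈ adjAt listAdj node, w ∈ pvClosure listAdj i :=
          fun w hw => pvClosure_step node hnode_in w hw
        have hrowB : ∀ w ∈ adjAt listAdj node, -nbNodes ≤ w ∧ w < nbNodes :=
          (hp.2.2.2.1 node hnode_in).2
        have hcast : ((nbNodes.toNat : Int)) = nbNodes := Int.toNat_of_nonneg (by omega)
        have hbndV : ∀ w ∈ adjAt listAdj node,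
            -(V.length : Int) ≤ w ∧ w < (V.length : Int) := by
          intro w hw
          have := hrowB w hw
          rw [hlen, hcast]
          exact this
        have hmeas := innerA_measure i (adjAt listAdj node) V rest p.1 p.2 hinner
        simp only [List.length_cons] at hfuel
        -- innerA lemmas speak about slIdx V.length; rewrite to nbNodes.toNat
        have hvisits : ∀ y ∈ adjAt listAdj node, visA p.1 (slIdx nbNodes.toNat y) = true := by
          intro y hy
          have := innerA_visits i _ _ _ _ _ hinner y hy (hbndV y hy).1 (hbndV y hy).2
          rwa [hlen] at this
        apply ih
        · omega
        · rw [hmeas.2, hlen]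
        · intro x hx
          rcases innerA_stack i _ _ _ _ _ hinner x hx with hxr | ⟨hxs, _, _⟩
          · obtain ⟨hin, hv⟩ := hS x (List.mem_cons_of_mem _ hxr)
            exact ⟨hin, innerA_mono i _ _ _ _ _ hinner _ hv⟩
          · exact ⟨hrowC x hxs, hvisits x hxs⟩
        · intro v hin hv
          rcases innerA_new i _ _ _ _ _ hinner (slIdx nbNodes.toNat v) hv with hold | ⟨y, hy, _, hs⟩
          · exact hVr v hin hold
          · rw [hlen] at hs
            have hyv : y = v := pre_inj hp (hrowC y hy) hin hs
            subst hyv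
            exact (hVr node hnode_in hnode_vis).tail hy
        · intro j hj
          rcases innerA_new i _ _ _ _ _ hinner j hj with hold | ⟨y, hy, _, hs⟩
          · exact hcov j hold
          · rw [hlen] at hs
            exact ⟨y, hrowC y hy, hs⟩
        · intro v hin hv hnotin w hw
          cases hvb : visA V (slIdx nbNodes.toNat v) with
          | true =>
            by_cases hvn : v = node
            · subst hvn
              exact ⟨innerA_ne i _ _ _ _ _ hinner w hw, hvisits w hw⟩
            · have hnr : v ∉ rest := fun hr => hnotin (innerA_super i _ _ _ _ _ hinner v hr)
              have hnold : v ∉ (node :: rest) := by simp [hvn, hnr]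
              obtain ⟨hne, hvw⟩ := hcl v hin hvb hnold w hw
              exact ⟨hne, innerA_mono i _ _ _ _ _ hinner _ hvw⟩
          | false =>
            obtain ⟨y, hy, hs⟩ := innerA_newly i _ _ _ _ _ hinner (slIdx nbNodes.toNat v) hvb hv
            rw [hlen] at hs
            have hyC : y ∈ pvClosure listAdj i := by
              rcases innerA_stack i _ _ _ _ _ hinner y hy with hyr | ⟨hys, _, _⟩
              · exact (hS y (List.mem_cons_of_mem _ hyr)).1
              · exact hrowC y hys
            have hyv : y = v := pre_inj hp hyC hin hs
            subst hyv
            exact (hnotin hy).elim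
        · exact innerA_mono i _ _ _ _ _ hinner _ hi

theorem A_iff (nbNodes : Int) (listAdj : List (List Int)) (i : Int)
    (hp : PreA nbNodes listAdj i) :
    (DFS nbNodes listAdj i = true ↔ NoBack listAdj i) := by
  have hnb := hp.1
  have hsl : slIdx nbNodes.toNat i < nbNodes.toNat := slIdx_lt hnb hp.2.1 hp.2.2.1
  have hlenr : (List.replicate nbNodes.toNat false).length = nbNodes.toNat := by simp
  have hvis : ∀ j : Nat,
      visA ((List.replicate nbNodes.toNat false).set (slIdx nbNodes.toNat i) true) j =
        if slIdx nbNodes.toNat i = j then true else false := by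
    intro j
    rw [visA_set, visA_replicate, hlenr]
    by_cases hj : slIdx nbNodes.toNat i = j
    · rw [if_pos ⟨hj, hsl⟩, if_pos hj]
    · rw [if_neg (fun hh => hj hh.1), if_neg hj]
  show loopA i listAdj _ _ [i] = true ↔ _
  apply loopA_iff hp
  · simp only [List.length_cons, List.length_nil]; omega
  · simp
  · intro x hx
    rcases List.mem_cons.1 hx with rfl | hx'
    · refine ⟨pvClosure_self, ?_⟩
      rw [hvis]; simp
    · simp at hx'
  · intro v hin hv
    rw [hvis] at hv
    by_cases hc : slIdx nbNodes.toNat i = slIdx nbNodes.toNat v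
    · have hvi : v = i := pre_inj hp hin pvClosure_self hc.symm
      rw [hvi]
      exact Relation.ReflTransGen.refl
    · rw [if_neg hc] at hv; exact absurd hv (by simp)
  · intro j hj
    rw [hvis] at hj
    by_cases hc : slIdx nbNodes.toNat i = j
    · exact ⟨i, pvClosure_self, hc⟩
    · rw [if_neg hc] at hj; exact absurd hj (by simp)
  · intro v hin hv hnotin
    rw [hvis] at hv
    by_cases hc : slIdx nbNodes.toNat i = slIdx nbNodes.toNat v
    · have hvi : v = i := pre_inj hp hin pvClosure_self hc.symm
      exact (hnotin (by simp [hvi])).elim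
    · rw [if_neg hc] at hv; exact absurd hv (by simp)
  · rw [hvis]; simp

-- ---- the B-side lemmas ----

theorem addNew_prefix (acc : List Int) (w : Int) : acc <+: addNew acc w := by
  unfold addNew; split_ifs
  · exact List.prefix_refl _
  · exact ⟨[w], rfl⟩

theorem addNew_mem (acc : List Int) (w x : Int) : x ∈ addNew acc w ↔ x ∈ acc ∨ x = w := by
  unfold addNew; split_ifs with h
  · constructor
    · exact Or.inl
    · intro hx
      rcases hx with hx | rfl
      · exact hx
      · exact h
  · simp [List.mem_append]

theorem addNew_nodup {acc : List Int} (w : Int) (hn : acc.Nodup) : (addNew acc w).Nodup := by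
  unfold addNew; split_ifs with h
  · exact hn
  · rw [List.nodup_append]
    refine ⟨hn, List.nodup_singleton w, ?_⟩
    intro a ha b hb hab
    simp only [List.mem_singleton] at hb
    rw [hab, hb] at ha
    exact h ha

theorem foldl_addNew_prefix : ∀ (ws acc : List Int), acc <+: ws.foldl addNew acc := by
  intro ws
  induction ws with
  | nil => intro acc; exact List.prefix_refl _
  | cons w ws ih => intro acc; exact (addNew_prefix acc w).trans (ih _)

theorem foldl_addNew_mem : ∀ (ws acc : List Int) (x : Int),
    x ∈ ws.foldl addNew acc ↔ x ∈ acc ∨ x ∈ ws := by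
  intro ws
  induction ws with
  | nil => intro acc x; simp
  | cons w ws ih =>
    intro acc x
    rw [List.foldl_cons, ih, addNew_mem]
    simp [List.mem_cons]
    tauto

theorem foldl_addNew_nodup : ∀ (ws acc : List Int), acc.Nodup → (ws.foldl addNew acc).Nodup := by
  intro ws
  induction ws with
  | nil => intro acc h; exact h
  | cons w ws ih => intro acc h; exact ih _ (addNew_nodup w h)

theorem expAux_prefix (listAdj : List (List Int)) : ∀ (vs acc : List Int),
    acc <+: vs.foldl (fun a v => (adjAt listAdj v).foldl addNew a) acc := by
  intro vs
  induction vs with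
  | nil => intro acc; exact List.prefix_refl _
  | cons v vs ih => intro acc; exact (foldl_addNew_prefix _ _).trans (ih _)

theorem expAux_mem (listAdj : List (List Int)) : ∀ (vs acc : List Int) (x : Int),
    x ∈ vs.foldl (fun a v => (adjAt listAdj v).foldl addNew a) acc ↔
      x ∈ acc ∨ ∃ v ∈ vs, x ∈ adjAt listAdj v := by
  intro vs
  induction vs with
  | nil => intro acc x; simp
  | cons v vs ih =>
    intro acc x
    rw [List.foldl_cons, ih, foldl_addNew_mem]
    constructor
    · rintro ((h | h) | ⟨u, hu, hx⟩)
      · exact Or.inl h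
      · exact Or.inr ⟨v, List.mem_cons_self, h⟩
      · exact Or.inr ⟨u, List.mem_cons_of_mem _ hu, hx⟩
    · rintro (h | ⟨u, hu, hx⟩)
      · exact Or.inl (Or.inl h)
      · rcases List.mem_cons.1 hu with rfl | hu'
        · exact Or.inl (Or.inr hx)
        · exact Or.inr ⟨u, hu', hx⟩

theorem expAux_nodup (listAdj : List (List Int)) : ∀ (vs acc : List Int), acc.Nodup →
    (vs.foldl (fun a v => (adjAt listAdj v).foldl addNew a) acc).Nodup := by
  intro vs
  induction vs with
  | nil => intro acc h; exact h
  | cons v vs ih => intro acc h; exact ih _ (foldl_addNew_nodup _ _ h)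

theorem expandB_prefix (listAdj : List (List Int)) (r : List Int) : r <+: expandB listAdj r :=
  expAux_prefix listAdj r r

theorem expandB_mem (listAdj : List (List Int)) (r : List Int) (x : Int) :
    x ∈ expandB listAdj r ↔ x ∈ r ∨ ∃ v ∈ r, x ∈ adjAt listAdj v :=
  expAux_mem listAdj r r x

theorem expandB_nodup (listAdj : List (List Int)) {r : List Int} (h : r.Nodup) :
    (expandB listAdj r).Nodup :=
  expAux_nodup listAdj r r h

-- if the per-round check fires, some collected (hence reachable) node has a back edge
theorem loopB_false (listAdj : List (List Int)) (i : Int) : ∀ (k : Nat) (r : List Int),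
    (∀ x ∈ r, Reach listAdj i x) → loopB listAdj i k r = false →
    ∃ v, Reach listAdj i v ∧ i ∈ adjAt listAdj v := by
  intro k
  induction k with
  | zero => intro r _ h; simp [loopB] at h
  | succ k ih =>
    intro r hs h
    simp only [loopB] at h
    by_cases hany : r.any (fun v => (adjAt listAdj v).contains i) = true
    · obtain ⟨v, hv, hc⟩ := List.any_eq_true.1 hany
      exact ⟨v, hs v hv, by simpa using hc⟩
    · rw [if_neg hany] at h
      split_ifs at h
      · refine ih (expandB listAdj r) ?_ h
        intro y hy
        rcases (expandB_mem listAdj r y).1 hy with hy' | ⟨v, hv, hyv⟩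
        · exact hs y hy'
        · exact (hs v hv).tail hyv

-- if the loop ends with True, every node reachable from the collected set was checked:
-- the fixpoint set is closed under expansion, so no reachable node has a back edge
theorem loopB_true (listAdj : List (List Int)) (i : Int) : ∀ (k : Nat) (r : List Int),
    r.Nodup → (∀ x ∈ r, x ∈ i :: listAdj.flatten) →
    listAdj.flatten.length + 1 < r.length + k →
    loopB listAdj i k r = true →
    ∀ u x, x ∈ r → Reach listAdj x u → i ∉ adjAt listAdj u := by
  intro k
  induction k with
  | zero =>
    intro r hn hin hlt
    have := (hn.subperm hin).length_le
    simp only [List.length_cons] at this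
    omega
  | succ k ih =>
    intro r hn hin hlt h
    simp only [loopB] at h
    by_cases hany : r.any (fun v => (adjAt listAdj v).contains i) = true
    · rw [if_pos hany] at h; exact absurd h (by simp)
    rw [if_neg hany] at h
    have hnoback : ∀ v ∈ r, i ∉ adjAt listAdj v := by
      intro v hv hmem
      exact hany (List.any_eq_true.2 ⟨v, hv, by simpa using hmem⟩)
    split_ifs at h with hfix
    · -- fixpoint: r is closed under expansion, so reachability stays inside r
      have hclosed : expandB listAdj r = r :=
        ((expandB_prefix listAdj r).eq_of_length hfix.symm).symm
      have hstay : ∀ u x, x ∈ r → Reach listAdj x u → u ∈ r := by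
        intro u x hx hr
        induction hr with
        | refl => exact hx
        | tail _ hbc ihr =>
          have : _ ∈ expandB listAdj r := (expandB_mem listAdj _ _).2 (Or.inr ⟨_, ihr, hbc⟩)
          rwa [hclosed] at this
      intro u x hx hr
      exact hnoback u (hstay u x hx hr)
    · -- the set grew: recurse
      have hsub : ∀ y ∈ expandB listAdj r, y ∈ i :: listAdj.flatten := by
        intro y hy
        rcases (expandB_mem listAdj r y).1 hy with hy' | ⟨v, _, hyv⟩
        · exact hin y hy'
        · exact List.mem_cons_of_mem _ (mem_adjAt_flatten hyv)
      have hgrow : r.length < (expandB listAdj r).length :=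
        lt_of_le_of_ne (expandB_prefix listAdj r).length_le (fun he => hfix he.symm)
      intro u x hx hr
      exact ih (expandB listAdj r) (expandB_nodup listAdj hn) hsub (by omega) h u x
        ((expandB_prefix listAdj r).subset hx) hr

theorem B_iff (nbNodes : Int) (listAdj : List (List Int)) (i : Int) :
    (DFS_alt nbNodes listAdj i = true ↔ NoBack listAdj i) := by
  unfold DFS_alt
  constructor
  · intro h v hr hmem
    exact loopB_true listAdj i (listAdj.flatten.length + 2) [i] (by simp)
      (by intro x hx; rw [List.mem_singleton] at hx; subst hx; simp)
      (by simp only [List.length_singleton]; omega) h v i (by simp) hr hmem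
  · intro hnb
    cases hres : loopB listAdj i (listAdj.flatten.length + 2) [i] with
    | true => rfl
    | false =>
      obtain ⟨v, hr, hmem⟩ := loopB_false listAdj i (listAdj.flatten.length + 2) [i]
        (by intro x hx; rw [List.mem_singleton] at hx; subst hx
            exact Relation.ReflTransGen.refl) hres
      exact absurd hmem (hnb v hr)

-- when no reachable node has an edge back to i, A cannot return False: its early
-- return fires only on a back edge from an explored (hence reachable) node
theorem loopA_clean (listAdj : List (List Int)) (i : Int)
    (hclean : ∀ v ∈ pvClosure listAdj i, i ∉ adjAt listAdj v) :
    ∀ (fuel : Nat) (V : List Bool) (S : List Int),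
    (∀ x ∈ S, x ∈ pvClosure listAdj i) → loopA i listAdj fuel V S = true := by
  intro fuel
  induction fuel with
  | zero => intro V S _; rfl
  | succ fuel ih =>
    intro V S hS
    cases S with
    | nil => rfl
    | cons node rest =>
      cases hinner : innerA i (adjAt listAdj node) V rest with
      | none =>
        have hback : i ∈ adjAt listAdj node := (innerA_none_iff i _ V rest).1 hinner
        exact absurd hback (hclean node (hS node List.mem_cons_self))
      | some p =>
        simp only [loopA, hinner]
        refine ih p.1 p.2 ?_
        intro x hx
        rcases innerA_stack i _ _ _ _ _ hinner x hx with hxr | ⟨hxs, _, _⟩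
        · exact hS x (List.mem_cons_of_mem _ hxr)
        · exact pvClosure_step node (hS node List.mem_cons_self) x hxs

-- in case (b) of Pre_DFS both programs answer False on their very first step
theorem A_false_of_selfrow (nbNodes : Int) (listAdj : List (List Int)) (i : Int)
    (hmem : i ∈ adjAt listAdj i) : DFS nbNodes listAdj i = false := by
  show loopA i listAdj _ _ [i] = false
  obtain ⟨m, hm⟩ : ∃ m, 2 * ((List.replicate nbNodes.toNat false).set
      (slIdx nbNodes.toNat i) true).count false + 2 = m + 1 := ⟨_, rfl⟩
  rw [hm]
  have hnone : innerA i (adjAt listAdj i)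
      ((List.replicate nbNodes.toNat false).set (slIdx nbNodes.toNat i) true) [] = none :=
    (innerA_none_iff i _ _ _).2 hmem
  simp only [loopA, hnone]

theorem B_false_of_selfrow (nbNodes : Int) (listAdj : List (List Int)) (i : Int)
    (hmem : i ∈ adjAt listAdj i) : DFS_alt nbNodes listAdj i = false := by
  unfold DFS_alt
  have hany : [i].any (fun v => (adjAt listAdj v).contains i) = true :=
    List.any_eq_true.2 ⟨i, List.mem_singleton.2 rfl, by simpa using hmem⟩
  simp only [loopB, hany, if_pos]

-- ===== VERDICT (by name: the statement is the Claim_ definition above) =====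
theorem DFS_spec : Claim_equal_DFS := by
  intro nbNodes listAdj i _hd hp
  unfold Spec_DFS
  have hB := B_iff nbNodes listAdj i
  obtain ⟨h1, h2, h3, hcase⟩ := hp
  rcases hcase with ⟨hval, hnd | hclean⟩ | ⟨hmem, _hpref⟩
  · have hA := A_iff nbNodes listAdj i ⟨h1, h2, h3, hval, hnd⟩
    cases hDA : DFS nbNodes listAdj i <;> cases hDB : DFS_alt nbNodes listAdj i <;> simp_all
  · have hAt : DFS nbNodes listAdj i = true := by
      show loopA i listAdj _ _ [i] = true
      refine loopA_clean listAdj i hclean _ _ [i] ?_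
      intro x hx
      rw [List.mem_singleton] at hx; subst hx
      exact pvClosure_self
    have hBt : DFS_alt nbNodes listAdj i = true := by
      rw [hB]
      intro v hr hmem
      exact hclean v (reach_mem_closure hr) hmem
    rw [hAt, hBt]
  · rw [A_false_of_selfrow nbNodes listAdj i hmem, B_false_of_selfrow nbNodes listAdj i hmem]
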